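-- pv_equiv track=rewrite | github.com/aorursy/KT_dataset_py | jamesphan2804_cmpt459-project.py | merge_dict_values
-- ===== SOURCE A (Python) =====
-- def merge_dict_values(original, rules, drop = []):
--
--     result = {}
--
--     arr_map = {}
--
--     for key, values in rules:
--
--         for val in values:
--
--             arr_map[val] = key
--
--
--
--     for key in original.keys():
--
--         new_key = key if key not in arr_map else arr_map[key]
--
--         if key not in drop and new_key not in drop:
--
--             val = original[key]
--
--             result[new_key] = val if new_key not in result else result[new_key] + val
--
--
--
--     return result
-- ===== SOURCE B (Python) =====
-- def merge_dict_values(original, rules, drop = []):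
--     # No value->key index and no accumulator dict: remap each key by scanning the
--     # rules backwards (last matching rule wins, like A's overwriting map), then
--     # build the distinct merged keys in encounter order and sum each group.
--     def remap(k):
--         for key, values in reversed(rules):
--             if k in values:
--                 return key
--         return k
--     pairs = [(remap(k), v) for k, v in original.items()
--              if k not in drop and remap(k) not in drop]
--     seen = []
--     for nk, _ in pairs:
--         if nk not in seen:
--             seen.append(nk)
--     return {nk: sum(v for k2, v in pairs if k2 == nk) for nk in seen}
-- ===== Notes on version B (the rewrite author's own statement) =====
-- stated objective: alternative
-- what changed: B drops both of A's dicts: instead of building a value-to-key map it remaps each key by a backwards scan of the rules (last match wins), and instead of folding sums into a result dict in-flight it collects the remapped pairs, lists the distinct merged keys in encounter order, and computes each result entry as the sum over a filter of the pairs (group-by via nested scans).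
import Mathlib
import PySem

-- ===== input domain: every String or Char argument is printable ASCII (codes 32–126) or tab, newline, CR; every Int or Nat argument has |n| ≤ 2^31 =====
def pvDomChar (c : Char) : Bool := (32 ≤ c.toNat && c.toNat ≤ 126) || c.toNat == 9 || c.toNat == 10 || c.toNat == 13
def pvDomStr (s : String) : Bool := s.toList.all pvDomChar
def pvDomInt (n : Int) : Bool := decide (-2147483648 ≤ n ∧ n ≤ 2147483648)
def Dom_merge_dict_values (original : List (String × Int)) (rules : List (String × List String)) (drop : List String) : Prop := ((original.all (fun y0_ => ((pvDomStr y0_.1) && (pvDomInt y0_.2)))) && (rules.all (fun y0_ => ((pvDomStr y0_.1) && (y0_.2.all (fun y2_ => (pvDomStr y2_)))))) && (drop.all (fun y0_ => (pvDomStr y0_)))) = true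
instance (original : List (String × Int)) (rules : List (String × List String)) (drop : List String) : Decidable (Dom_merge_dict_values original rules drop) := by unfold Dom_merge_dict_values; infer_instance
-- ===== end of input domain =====

-- B replaces A's two dicts (value-to-key index, in-flight accumulator) with a backwards
-- rule scan per key and a list-the-groups-then-sum-each-group pass; same result, no speed claim.

-- ===== PORT A =====
-- literal port of A: build arr_map by overwriting inserts, then one pass folding sums into result
def merge_dict_values (original : List (String × Int)) (rules : List (String × List String)) (drop : List String) : List (String × Int) :=
  let arr_map : PySem.Dict String String :=
    rules.foldl (fun m kv => kv.2.foldl (fun m v => m.insert v kv.1) m) PySem.Dict.empty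
  let od : PySem.Dict String Int := PySem.Dict.ofList original
  let result : PySem.Dict String Int :=
    od.items.foldl (fun r kv =>
      let key := kv.1
      let new_key := if arr_map.contains key then arr_map.getD key key else key
      if !(drop.contains key) && !(drop.contains new_key) then
        r.insert new_key (if r.contains new_key then r.getD new_key 0 + kv.2 else kv.2)
      else r) PySem.Dict.empty
  result.items

-- ===== PORT B =====
-- B's remap: scan the (already reversed) rules, first match wins; else the key itself
def pvRemap (rs : List (String × List String)) (k : String) : String :=
  match rs with
  | [] => k
  | (key, values) :: t => if values.contains k then key else pvRemap t k

-- literal port of B: remapped kept pairs, distinct merged keys in encounter order, sum per group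
def merge_dict_values_alt (original : List (String × Int)) (rules : List (String × List String)) (drop : List String) : List (String × Int) :=
  let od : PySem.Dict String Int := PySem.Dict.ofList original
  let pairs : List (String × Int) :=
    (od.items.filter (fun kv =>
        !(drop.contains kv.1) && !(drop.contains (pvRemap rules.reverse kv.1)))).map
      (fun kv => (pvRemap rules.reverse kv.1, kv.2))
  let seen : List String :=
    pairs.foldl (fun s p => if s.contains p.1 then s else s ++ [p.1]) []
  seen.map (fun nk => (nk, ((pairs.filter (fun q => q.1 == nk)).map (·.2)).sum))

-- ===== PRECONDITION & SPEC =====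
def Spec_merge_dict_values (original : List (String × Int)) (rules : List (String × List String)) (drop : List String) (out : List (String × Int)) : Prop := out = merge_dict_values_alt original rules drop
instance (original : List (String × Int)) (rules : List (String × List String)) (drop : List String) (out : List (String × Int)) : Decidable (Spec_merge_dict_values original rules drop out) := by unfold Spec_merge_dict_values; infer_instance

-- ===== CLAIM =====
def Claim_equal_merge_dict_values : Prop := ∀ (original : List (String × Int)) (rules : List (String × List String)) (drop : List String), Dom_merge_dict_values original rules drop → Spec_merge_dict_values original rules drop (merge_dict_values original rules drop)

-- ===== LEMMAS AND PROOFS =====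

lemma pvNk_eq (m : PySem.Dict String String) (k : String) :
    (if m.contains k then m.getD k k else k) = m.getD k k := by
  by_cases h : m.contains k
  · simp [h]
  · simp only [Bool.not_eq_true] at h
    simp [h, PySem.Dict.getD_of_not_contains m k h]

-- inner rule loop: every insert writes the same value, so any membership yields key
lemma pvInner (values : List String) (key k : String) (m : PySem.Dict String String) :
    (values.foldl (fun m v => m.insert v key) m).getD k k
      = if values.contains k then key else m.getD k k := by
  induction values generalizing m with
  | nil => simp
  | cons v t ih =>
    simp only [List.foldl_cons, ih, List.contains_cons]
    by_cases hv : v = k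
    · subst hv
      by_cases ht : v ∈ t <;> simp [ht, PySem.Dict.getD_insert_self]
    · by_cases ht : k ∈ t
      · simp [ht]
      · simp [ht, Ne.symm hv, PySem.Dict.getD_insert_of_ne _ _ _ (Ne.symm hv)]

-- reversed-scan characterisation of the foldl-built arr_map, generalized over the seed dict
def pvRemapD (rs : List (String × List String)) (m : PySem.Dict String String) (k : String) : String :=
  match rs with
  | [] => m.getD k k
  | (key, values) :: t => if values.contains k then key else pvRemapD t m k

lemma pvRemapD_append (l : List (String × List String)) (key : String) (values : List String)
    (m : PySem.Dict String String) (k : String) :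
    pvRemapD (l ++ [(key, values)]) m k
      = pvRemapD l (values.foldl (fun m v => m.insert v key) m) k := by
  induction l with
  | nil => simp [pvRemapD, pvInner]
  | cons h t ih => cases h; simp [pvRemapD, ih]

lemma pvArrMap_eq_remapD (rs : List (String × List String)) (m : PySem.Dict String String) (k : String) :
    (rs.foldl (fun m kv => kv.2.foldl (fun m v => m.insert v kv.1) m) m).getD k k
      = pvRemapD rs.reverse m k := by
  induction rs generalizing m with
  | nil => rfl
  | cons r t ih =>
    cases r with
    | mk key values =>
      simp only [List.foldl_cons, ih, List.reverse_cons, pvRemapD_append]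

lemma pvRemapD_empty (rs : List (String × List String)) (k : String) :
    pvRemapD rs PySem.Dict.empty k = pvRemap rs k := by
  induction rs with
  | nil => simp [pvRemapD, pvRemap, PySem.Dict.getD_empty]
  | cons r t ih => cases r; simp [pvRemapD, pvRemap, ih]

-- A's accumulator: final count at key c = sum of matching values
lemma pvInsertSum (Q : List (String × Int)) (d : PySem.Dict String Int) (c : String) :
    (Q.foldl (fun r kv => r.insert kv.1 (if r.contains kv.1 then r.getD kv.1 0 + kv.2 else kv.2)) d).getD c 0
      = d.getD c 0 + ((Q.filter (fun p => p.1 == c)).map (·.2)).sum := by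
  induction Q generalizing d with
  | nil => simp
  | cons p Q ih =>
    simp only [List.foldl_cons, ih]
    by_cases hc : p.1 = c
    · subst hc
      rw [PySem.Dict.getD_insert_self]
      by_cases hcon : d.contains p.1
      · simp [hcon]; ring
      · simp only [Bool.not_eq_true] at hcon
        rw [PySem.Dict.getD_of_not_contains d 0 hcon]
        simp [hcon]
    · rw [PySem.Dict.getD_insert_of_ne _ _ _ (Ne.symm hc)]
      simp [hc]

-- A's fold over remapped kept pairs P produces exactly B's group-by output
lemma pvItemsRel (P : List (String × Int)) :
    (P.foldl (fun r kv => r.insert kv.1 (if r.contains kv.1 then r.getD kv.1 0 + kv.2 else kv.2)) PySem.Dict.empty).items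
      = (P.foldl (fun s p => if s.contains p.1 then s else s ++ [p.1]) []).map
          (fun nk => (nk, ((P.filter (fun q => q.1 == nk)).map (·.2)).sum)) := by
  have hnd := PySem.Dict.nodup_keys_foldl_insert_key P (fun kv : String × Int => kv.1)
      (fun r kv => if r.contains kv.1 then r.getD kv.1 0 + kv.2 else kv.2) PySem.Dict.empty
      PySem.Dict.nodup_keys_empty
  rw [PySem.Dict.items_eq_map_keys _ hnd 0, PySem.Dict.keys_foldl_insert_key]
  have hseen : PySem.Set.update (PySem.Dict.empty : PySem.Dict String Int).keys
      (P.map (fun kv : String × Int => kv.1))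
      = P.foldl (fun s p => if s.contains p.1 then s else s ++ [p.1]) [] := by
    show (P.map (fun kv : String × Int => kv.1)).foldl PySem.Set.add ([] : List String) = _
    rw [List.foldl_map]
    rfl
  rw [hseen]
  refine List.map_congr_left (fun k _ => ?_)
  rw [pvInsertSum]
  simp [PySem.Dict.getD_empty]

-- ===== VERDICT =====
theorem merge_dict_values_spec : Claim_equal_merge_dict_values := by
  intro original rules drop _
  unfold Spec_merge_dict_values merge_dict_values merge_dict_values_alt
  simp only [pvNk_eq]
  simp only [pvArrMap_eq_remapD, pvRemapD_empty]
  rw [← List.foldl_filter]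
  set Q := (PySem.Dict.ofList original).items
  set g := fun kv : String × Int =>
    !(drop.contains kv.1) && !(drop.contains (pvRemap rules.reverse kv.1))
  have h := pvItemsRel ((Q.filter g).map (fun kv => (pvRemap rules.reverse kv.1, kv.2)))
  rw [List.foldl_map] at h
  exact h
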